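-- pv_equiv track=rewrite | github.com/Pragith-C/Python | club_functions.py | dictionary_to_list
-- ===== SOURCE A (Python) =====
-- from typing import List, Tuple, Dict, TextIO
--
-- def dictionary_to_list(dictionary: Dict[str, List[str]]) -> List[str]:
--     """Return a list with all the keys and key values of the
--     dictionary as elements of a list.
--
--     >>> dictionary_to_list(P2C) == [
--     ...    'Michelle Tanner', 'Comet Club', 'Danny R Tanner',
--     ...    'Parent Council', 'Kimmy Gibbler', 'Rock N Rollers', 'Smash Club',
--     ...    'Jesse Katsopolis', 'Joey Gladstone', 'Comics R Us']
--     True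
--
--     >>> dictionary_to_list({'Claire D': ['Parent Teacher Association']})
--     ['Claire D', 'Parent Teacher Association']
--
--     """
--     lst = []
--     for key in dictionary:
--         lst.append(key)
--         for i in dictionary[key]:
--             lst.append(i)
--     new_lst = []
--     for i in lst:
--         if i not in new_lst:
--             new_lst.append(i)
--     return new_lst
-- ===== SOURCE B (Python) =====
-- def dictionary_to_list(dictionary):
--     """One pass over the dict: membership-guarded appends with a seen set;
--     no intermediate flattened list, no quadratic rescan."""
--     result = []
--     seen = set()
--     for key, values in dictionary.items():
--         if key not in seen:
--             result.append(key)
--             seen.add(key)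
--         for v in values:
--             if v not in seen:
--                 result.append(v)
--                 seen.add(v)
--     return result
-- ===== Notes on version B (the rewrite author's own statement) =====
-- stated objective: faster
-- what changed: Replaces A's two phases (build a flattened list, then dedup it by quadratic 'not in list' rescans) with a single traversal of the dict that does membership-guarded appends against a hash set, never materialising the flattened list. Pre_ excludes assoc lists with duplicate keys, which a Python dict cannot represent.
import Mathlib
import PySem

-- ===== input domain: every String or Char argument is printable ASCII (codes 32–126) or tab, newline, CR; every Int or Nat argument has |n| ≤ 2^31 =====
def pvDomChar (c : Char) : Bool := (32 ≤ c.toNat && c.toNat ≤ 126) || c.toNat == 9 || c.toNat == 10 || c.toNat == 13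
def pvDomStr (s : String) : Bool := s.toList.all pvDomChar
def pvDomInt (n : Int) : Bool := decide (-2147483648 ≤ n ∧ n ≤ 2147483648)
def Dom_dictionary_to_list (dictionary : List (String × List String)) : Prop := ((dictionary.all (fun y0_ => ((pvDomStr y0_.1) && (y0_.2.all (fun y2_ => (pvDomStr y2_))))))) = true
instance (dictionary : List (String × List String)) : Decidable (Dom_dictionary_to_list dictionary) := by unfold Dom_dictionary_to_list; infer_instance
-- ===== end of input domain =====

-- B is a single pass with a seen set (no intermediate flattened list, no quadratic rescan);
-- equal return value proved on all assoc lists with distinct keys.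

-- ===== PORT A =====
-- lst = []; for key in dictionary: lst.append(key); for i in dictionary[key]: lst.append(i)
-- new_lst = []; for i in lst: (if i not in new_lst: new_lst.append(i)); return new_lst
def dictionary_to_list (dictionary : List (String × List String)) : List String :=
  let lst : List String :=
    dictionary.foldl
      (fun lst kv =>
        ((PySem.Dict.mk dictionary).getD kv.1 []).foldl
          (fun l i => l ++ [i]) (lst ++ [kv.1]))
      []
  lst.foldl (fun nl i => if i ∈ nl then nl else nl ++ [i]) []

-- ===== PORT B =====
-- one guarded append: if x not in seen: result.append(x); seen.add(x)
def pvBStep (st : List String × PySem.Set String) (x : String) :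
    List String × PySem.Set String :=
  if PySem.Set.contains st.2 x then st else (st.1 ++ [x], PySem.Set.add st.2 x)

def dictionary_to_list_alt (dictionary : List (String × List String)) : List String :=
  (dictionary.foldl
      (fun st kv => kv.2.foldl pvBStep (pvBStep st kv.1))
      ([], PySem.Set.empty)).1

-- ===== PRECONDITION & SPEC =====
-- Pre_ excludes assoc lists with duplicate keys: a Python dict cannot hold them (the dict built
-- from such a list silently merges, keeping the last value), so the encoding is ambiguous there.
def Pre_dictionary_to_list (dictionary : List (String × List String)) : Prop :=
  (dictionary.map Prod.fst).Nodup
instance (dictionary : List (String × List String)) : Decidable (Pre_dictionary_to_list dictionary) := by unfold Pre_dictionary_to_list; infer_instance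

def pvWitness_dictionary_to_list : (List (String × List String)) :=
  [("Claire D", ["Parent Teacher Association", "Claire D"]), ("Bob", [])]

def Spec_dictionary_to_list (dictionary : List (String × List String)) (out : List String) : Prop := out = dictionary_to_list_alt dictionary
instance (dictionary : List (String × List String)) (out : List String) : Decidable (Spec_dictionary_to_list dictionary out) := by unfold Spec_dictionary_to_list; infer_instance

-- ===== CLAIM (what is proved, stated in full; the proofs are below) =====
def Claim_equal_dictionary_to_list : Prop := ∀ (dictionary : List (String × List String)), Dom_dictionary_to_list dictionary → Pre_dictionary_to_list dictionary → Spec_dictionary_to_list dictionary (dictionary_to_list dictionary)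

-- ===== LEMMAS AND PROOFS =====

-- A's dedup step over a plain list
def pvAStep (nl : List String) (i : String) : List String :=
  if i ∈ nl then nl else nl ++ [i]

-- folding over a flatMap is the nested fold
theorem pv_foldl_flatMap {α β σ : Type} (g : α → List β) (f : σ → β → σ) :
    ∀ (l : List α) (init : σ),
      (l.flatMap g).foldl f init = l.foldl (fun s x => (g x).foldl f s) init := by
  intro l
  induction l with
  | nil => intro init; rfl
  | cons a t ih => intro init; simp [List.flatMap_cons, List.foldl_append, ih]

-- B's guarded fold computes A's dedup fold, with the seen set tracking exactly the result's members
theorem pv_bstep_fold (xs : List String) :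
    ∀ (res : List String) (seen : PySem.Set String),
      (∀ x, x ∈ seen ↔ x ∈ res) →
      (xs.foldl pvBStep (res, seen)).1 = xs.foldl pvAStep res ∧
      (∀ x, x ∈ (xs.foldl pvBStep (res, seen)).2 ↔ x ∈ xs.foldl pvAStep res) := by
  induction xs with
  | nil => intro res seen h; exact ⟨rfl, h⟩
  | cons a t ih =>
    intro res seen h
    simp only [List.foldl_cons]
    by_cases ha : a ∈ res
    · have hs : a ∈ seen := (h a).2 ha
      have hA : pvAStep res a = res := by simp [pvAStep, ha]
      have hB : pvBStep (res, seen) a = (res, seen) := by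
        simp [pvBStep, hs]
      rw [hA, hB]; exact ih res seen h
    · have hs : a ∉ seen := fun hx => ha ((h a).1 hx)
      have hA : pvAStep res a = res ++ [a] := by simp [pvAStep, ha]
      have hB : pvBStep (res, seen) a = (res ++ [a], PySem.Set.add seen a) := by
        simp [pvBStep, hs]
      rw [hA, hB]
      refine ih (res ++ [a]) (PySem.Set.add seen a) ?_
      intro x
      constructor
      · intro hx
        rcases (PySem.Set.mem_add seen a x).1 hx with hx | hx
        · exact List.mem_append_left _ ((h x).1 hx)
        · simp [hx]
      · intro hx
        rcases List.mem_append.1 hx with hx | hx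
        · exact (PySem.Set.mem_add seen a x).2 (Or.inl ((h x).2 hx))
        · exact (PySem.Set.mem_add seen a x).2 (Or.inr (by simpa using hx))

theorem pv_lookup_eq (d : List (String × List String))
    (hnd : (d.map Prod.fst).Nodup) :
    ∀ kv ∈ d, (PySem.Dict.mk d).getD kv.1 [] = kv.2 := by
  intro kv hkv
  have : ((kv.1, kv.2) : String × List String) ∈ (PySem.Dict.mk d).items := by
    simpa [PySem.Dict.items] using hkv
  exact PySem.Dict.getD_of_mem_items (PySem.Dict.mk d) this
    (by simpa [PySem.Dict.keys, PySem.Dict.items] using hnd) []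

-- ===== VERDICT (by name: the statement is the Claim_ definition above) =====
theorem dictionary_to_list_spec : Claim_equal_dictionary_to_list := by
  intro d _ hpre
  unfold Spec_dictionary_to_list dictionary_to_list dictionary_to_list_alt
  -- A's first loop builds the flatten with looked-up values
  have hA1 : d.foldl
      (fun lst kv => ((PySem.Dict.mk d).getD kv.1 []).foldl
        (fun l i => l ++ [i]) (lst ++ [kv.1])) []
      = d.flatMap (fun kv => kv.1 :: kv.2) := by
    have := (pv_foldl_flatMap (fun kv : String × List String => kv.1 :: kv.2)
      (fun (l : List String) i => l ++ [i]) d []).symm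
    rw [PySem.List.foldl_append_singleton_eq_self] at this
    simp only [List.nil_append] at this
    rw [← this]
    apply PySem.List.foldl_congr_mem
    intro acc kv hkv
    rw [pv_lookup_eq d hpre kv hkv]
    rfl
  -- B is the same guarded fold over the same flatten
  have hB := pv_bstep_fold (d.flatMap (fun kv => kv.1 :: kv.2)) [] PySem.Set.empty
    (by intro x; simp [PySem.Set.empty])
  rw [pv_foldl_flatMap] at hB
  simp only [List.foldl_cons] at hB
  simp only [hA1]
  exact hB.1.symm
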